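-- pv_equiv track=rewrite | github.com/EntityFile/UCU_Project | Lab 0/lab0_2.py | alo
-- ===== SOURCE A (Python) =====
-- def alo(lines):
-- 	final_list = []
-- 	for el_ind in range(len(lines[0])):
-- 		lst = []
-- 		space_count = 0
-- 		for i in range(len(lines)):
-- 			if not lines[i][el_ind] in lst:
-- 				if not lines[i][el_ind] in ['a','o','i','e','u']:
-- 					if not lines[i][el_ind] == ' ':
-- 						lst.append(lines[i][el_ind])
-- 		lst = sorted(lst)
-- 		if not len(lst) == len(lines):
-- 			for k in range(len(lines)-len(lst)):
-- 				lst.append(' ')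
-- 		final_list.extend(lst)
-- 	return final_list
-- ===== SOURCE B (Python) =====
-- def alo(lines):
-- 	ncols = len(lines[0])
-- 	nrows = len(lines)
-- 	present = [[False] * 128 for _ in range(ncols)]
-- 	for line in lines:
-- 		for j in range(ncols):
-- 			present[j][ord(line[j])] = True
-- 	banned = [ord(c) for c in ' aoieu']
-- 	out = []
-- 	for row in present:
-- 		count = 0
-- 		for code in range(128):
-- 			if row[code] and code not in banned:
-- 				out.append(chr(code))
-- 				count += 1
-- 		out.extend(' ' * (nrows - count))
-- 	return out
-- ===== Notes on version B (the rewrite author's own statement) =====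
-- stated objective: alternative
-- what changed: Replaces A's per-column dedup-list scan plus comparison sort with a counting-sort scheme: one pass marks a boolean presence matrix present[column][ASCII code], then each column is emitted by scanning the 128 codes in ascending order (no sorted(), no membership dedup), padding from a running count.
import Mathlib
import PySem

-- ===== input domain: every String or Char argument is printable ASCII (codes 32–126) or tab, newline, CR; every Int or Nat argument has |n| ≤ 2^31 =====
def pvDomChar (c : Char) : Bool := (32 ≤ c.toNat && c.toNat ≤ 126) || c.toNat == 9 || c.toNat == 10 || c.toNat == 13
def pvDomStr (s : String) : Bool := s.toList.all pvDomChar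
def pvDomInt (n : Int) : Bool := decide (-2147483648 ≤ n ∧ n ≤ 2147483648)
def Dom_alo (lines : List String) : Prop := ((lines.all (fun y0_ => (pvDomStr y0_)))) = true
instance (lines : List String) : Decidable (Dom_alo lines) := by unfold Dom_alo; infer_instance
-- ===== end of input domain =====

-- B replaces A's per-column dedup-and-comparison-sort with a counting-sort scheme: one pass marks a
-- boolean presence matrix present[column][ASCII code], then each column is emitted by scanning the
-- 128 codes in ascending order (alternative algorithm, same results).

-- Characters are modelled as Char; the 1-char Python strings of the result are rebuilt with pvSing.
def pvSing (c : Char) : String := String.ofList [c]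

-- ===== PORT A =====
-- A's inner loop: for i in range(len(lines)): dedup/filter lines[i][el_ind] into lst
def aloInner (lines : List String) (el_ind : Int) : List Char :=
  (PySem.List.pyRange 0 (lines.length : Int) 1).foldl
    (fun lst i =>
      let c := PySem.List.pyGetD (PySem.List.pyGetD lines i "").toList el_ind ' '
      if ¬ (c ∈ lst) then
        if ¬ (c ∈ (['a','o','i','e','u'] : List Char)) then
          if ¬ (c = ' ') then lst ++ [c] else lst
        else lst
      else lst) []

-- A's padding: if len(lst) != len(lines): append ' ' (len(lines)-len(lst)) times
def aloPad (lines : List String) (lst : List Char) : List Char :=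
  if ¬ (lst.length = lines.length) then
    (PySem.List.pyRange 0 ((lines.length : Int) - (lst.length : Int)) 1).foldl
      (fun l _ => l ++ [' ']) lst
  else lst

def alo (lines : List String) : List String :=
  (PySem.List.pyRange 0 ((PySem.List.pyGetD lines 0 "").toList.length : Int) 1).foldl
    (fun final_list el_ind =>
      final_list ++
        (aloPad lines (PySem.List.sorted (aloInner lines el_ind) (fun x => x) false)).map pvSing)
    []

-- ===== PORT B =====
-- banned = [ord(c) for c in ' aoieu']
def altBanned : List Int := (" aoieu".toList).map (fun c => (c.toNat : Int))

-- B's marking step for one line: for j in range(ncols): present[j][ord(line[j])] = True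
def altStep (line : List Char) (present : List (List Bool)) : List (List Bool) :=
  present.mapIdx (fun j row =>
    PySem.List.pySetD row ((PySem.List.pyGetD line (j : Int) ' ').toNat : Int) true)

-- B's emission scan for one column: for code in range(128): if row[code] and code not in banned: append chr(code)
def altEmit (row : List Bool) (acc : List String × Int) : List String × Int :=
  (PySem.List.pyRange 0 128 1).foldl
    (fun acc code =>
      if PySem.List.pyGetD row code false = true ∧ ¬ code ∈ altBanned
      then (acc.1 ++ [pvSing (Char.ofNat code.toNat)], acc.2 + 1)
      else acc) acc

def alo_alt (lines : List String) : List String :=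
  let ncols := (PySem.List.pyGetD lines 0 "").toList.length
  let nrows := lines.length
  let present := lines.foldl (fun p line => altStep line.toList p)
    (List.replicate ncols (List.replicate 128 false))
  present.foldl (fun out row =>
    let oc := altEmit row (out, 0)
    oc.1 ++ List.replicate (((nrows : Int) - oc.2)).toNat " ") []

-- ===== PRECONDITION & SPEC =====
-- Pre_ excludes exactly the inputs where the Python A raises IndexError: empty input (lines[0])
-- and ragged input where some line is shorter than the first (lines[i][el_ind]).
def Pre_alo (lines : List String) : Prop :=
  lines ≠ [] ∧ ∀ s ∈ lines, (lines.headD "").toList.length ≤ s.toList.length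
instance (lines : List String) : Decidable (Pre_alo lines) := by unfold Pre_alo; infer_instance
def pvWitness_alo : List String := ["ab c", "bad "]

def Spec_alo (lines : List String) (out : List String) : Prop := out = alo_alt lines
instance (lines : List String) (out : List String) : Decidable (Spec_alo lines out) := by unfold Spec_alo; infer_instance

-- ===== CLAIM (what is proved, stated in full; the proofs are below) =====
def Claim_equal_alo : Prop := ∀ (lines : List String), Dom_alo lines → Pre_alo lines → Spec_alo lines (alo lines)

-- ===== LEMMAS AND PROOFS =====

-- The characters A and B read in column j (default ' ' matches both ports' pyGetD defaults).
def colChars (lines : List String) (j : Nat) : List Char :=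
  lines.map (fun s => PySem.List.pyGetD s.toList (j : Int) ' ')

def keepChar (c : Char) : Bool := !(c ∈ (['a','o','i','e','u'] : List Char)) && !(c = ' ')

def setStep (s : List Char) (c : Char) : List Char :=
  if keepChar c then PySem.Set.add s c else s

def updRow (row : List Bool) (c : Char) : List Bool :=
  PySem.List.pySetD row ((c.toNat : Nat) : Int) true

-- the ascending list of characters B emits for a presence row
def emitChars (row : List Bool) : List Char :=
  ((List.range 128).filter
    (fun k => row.getD k false && !(decide (((k : Nat) : Int) ∈ altBanned)))).map Char.ofNat

-- ---------- A side ----------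

theorem step_eq (c : Char) (lst : List Char) :
    (if ¬ (c ∈ lst) then
        if ¬ (c ∈ (['a','o','i','e','u'] : List Char)) then
          if ¬ (c = ' ') then lst ++ [c] else lst
        else lst
      else lst)
      = setStep lst c := by
  by_cases hm : c ∈ lst <;> by_cases hv : c ∈ (['a','o','i','e','u'] : List Char) <;>
    by_cases hs : c = ' ' <;>
    simp [setStep, keepChar, PySem.Set.add, PySem.Set.contains, hm, hv, hs]

theorem innerA (lines : List String) (j : Nat) :
    aloInner lines (j : Int) = (colChars lines j).foldl setStep [] := by
  unfold aloInner
  rw [PySem.List.foldl_pyRange_zero_pyGetD' lines ""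
    (fun lst line =>
      let c := PySem.List.pyGetD line.toList (j : Int) ' '
      if ¬ (c ∈ lst) then
        if ¬ (c ∈ (['a','o','i','e','u'] : List Char)) then
          if ¬ (c = ' ') then lst ++ [c] else lst
        else lst
      else lst) []]
  unfold colChars
  rw [List.foldl_map]
  apply PySem.List.foldl_congr_mem
  intro acc x _
  exact step_eq _ acc

theorem mem_foldl_setStep (cs : List Char) (s : List Char) (x : Char) :
    x ∈ cs.foldl setStep s ↔ x ∈ s ∨ (x ∈ cs ∧ keepChar x) := by
  induction cs generalizing s with
  | nil => simp
  | cons c cs ih =>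
    simp only [List.foldl_cons, ih, setStep]
    split_ifs with h
    · rw [PySem.Set.mem_add]
      constructor
      · rintro (⟨h1 | h1⟩ | h1)
        · exact Or.inl h1
        · exact Or.inr ⟨by simp [h1], h1 ▸ h⟩
        · exact Or.inr ⟨List.mem_cons_of_mem _ h1.1, h1.2⟩
      · rintro (h1 | ⟨h1, h2⟩)
        · exact Or.inl (Or.inl h1)
        · rcases List.mem_cons.mp h1 with h1 | h1
          · exact Or.inl (Or.inr h1)
          · exact Or.inr ⟨h1, h2⟩
    · constructor
      · rintro (h1 | h1)
        · exact Or.inl h1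
        · exact Or.inr ⟨List.mem_cons_of_mem _ h1.1, h1.2⟩
      · rintro (h1 | ⟨h1, h2⟩)
        · exact Or.inl h1
        · rcases List.mem_cons.mp h1 with h1 | h1
          · exact absurd (h1 ▸ h2) h
          · exact Or.inr ⟨h1, h2⟩

theorem nodup_foldl_setStep (cs : List Char) (s : List Char) (hs : s.Nodup) :
    (cs.foldl setStep s).Nodup := by
  induction cs generalizing s with
  | nil => exact hs
  | cons c cs ih =>
    simp only [List.foldl_cons, setStep]
    split_ifs with h
    · exact ih _ (PySem.Set.nodup_add s c hs)
    · exact ih _ hs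

-- ---------- B side ----------

theorem toNat_ofNat_lt (n : Nat) (h : n < 128) : (Char.ofNat n).toNat = n := by
  rw [Char.toNat_ofNat, if_pos (Or.inl (by omega))]

theorem char_lt_of_toNat_lt (a b : Char) (h : a.toNat < b.toNat) : a < b := by
  simp only [Char.lt_def, UInt32.lt_iff_toNat_lt]
  exact h

theorem toNat_injective (a b : Char) (h : a.toNat = b.toNat) : a = b := by
  rw [← Char.ofNat_toNat a, ← Char.ofNat_toNat b, h]

theorem altStep_map_range (line : List Char) (n : Nat) (f : Nat → List Bool) :
    altStep line ((List.range n).map f)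
      = (List.range n).map (fun j => updRow (f j) (PySem.List.pyGetD line (j : Int) ' ')) := by
  apply List.ext_getElem <;> simp [altStep, updRow]

theorem foldl_altStep (ls : List String) (n : Nat) (f : Nat → List Bool) :
    ls.foldl (fun p line => altStep line.toList p) ((List.range n).map f)
      = (List.range n).map
          (fun (j : Nat) => ls.foldl (fun row line => updRow row (PySem.List.pyGetD line.toList (j : Int) ' ')) (f j)) := by
  induction ls generalizing f with
  | nil => simp
  | cons l ls ih =>
    simp only [List.foldl_cons, altStep_map_range]
    exact ih (fun j => updRow (f j) (PySem.List.pyGetD l.toList (j : Int) ' '))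

theorem getD_foldl_updRow (cs : List Char) (row : List Bool) (k : Nat)
    (hlen : row.length = 128) (hcs : ∀ c ∈ cs, c.toNat < 128) (_hk : k < 128) :
    (cs.foldl updRow row).getD k false = (row.getD k false || cs.any (fun c => c.toNat = k)) := by
  induction cs generalizing row with
  | nil => simp
  | cons c cs ih =>
    have hc : c.toNat < 128 := hcs c (List.mem_cons_self ..)
    simp only [List.foldl_cons, List.any_cons]
    rw [ih (updRow row c) (by simp [updRow, hlen])
      (fun x hx => hcs x (List.mem_cons_of_mem _ hx))]
    have := PySem.List.pyGetD_pySetD_natCast row c.toNat k true false (by omega)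
    simp only [PySem.List.pyGetD_natCast] at this
    unfold updRow
    rw [this]
    by_cases h : k = c.toNat
    · simp [h, Bool.or_comm]
    · simp only [if_neg h]
      have : ¬ (c.toNat = k) := fun hh => h hh.symm
      simp [this]

-- emission fold shape: appends the filtered images and counts them
theorem foldl_emit_shape (l : List Nat) (p : Nat → Bool) (g : Nat → String)
    (out : List String) (cnt : Int) :
    l.foldl (fun (acc : List String × Int) k =>
        if p k = true then (acc.1 ++ [g k], acc.2 + 1) else acc) (out, cnt)
      = (out ++ (l.filter p).map g, cnt + ((l.filter p).length : Int)) := by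
  induction l generalizing out cnt with
  | nil => simp
  | cons x l ih =>
    by_cases h : p x = true
    · simp only [List.foldl_cons, h, if_true, ih, List.filter_cons, List.map_cons,
        List.length_cons, Prod.mk.injEq]
      refine ⟨by simp, by push_cast; ring⟩
    · simp [List.foldl_cons, ih, h]

theorem altEmit_eq (row : List Bool) (out : List String) :
    altEmit row (out, 0)
      = (out ++ (emitChars row).map pvSing, ((emitChars row).length : Int)) := by
  unfold altEmit
  have h128 : (128 : Int) = ((128 : Nat) : Int) := rfl
  rw [h128, PySem.List.pyRange_zero_nat, List.foldl_map]
  have hcong : ∀ (acc : List String × Int) (k : Nat),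
      (if PySem.List.pyGetD row ((k : Nat) : Int) false = true ∧ ¬ ((k : Nat) : Int) ∈ altBanned
        then (acc.1 ++ [pvSing (Char.ofNat (((k : Nat) : Int)).toNat)], acc.2 + 1)
        else acc)
      = (if (row.getD k false && !(decide (((k : Nat) : Int) ∈ altBanned))) = true
          then (acc.1 ++ [pvSing (Char.ofNat k)], acc.2 + 1) else acc) := by
    intro acc k
    simp [PySem.List.pyGetD_natCast, Int.toNat_natCast, and_comm]
  rw [PySem.List.foldl_congr_mem _ _
    (fun (acc : List String × Int) k =>
      if (row.getD k false && !(decide (((k : Nat) : Int) ∈ altBanned))) = true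
      then (acc.1 ++ [pvSing (Char.ofNat k)], acc.2 + 1) else acc) _
    (fun acc x _ => hcong acc x)]
  rw [foldl_emit_shape (List.range 128)
    (fun k => row.getD k false && !(decide (((k : Nat) : Int) ∈ altBanned)))
    (fun k => pvSing (Char.ofNat k)) out 0]
  unfold emitChars
  simp [List.map_map, Function.comp_def]

-- the banned codes are exactly the codes of ' ' and the lowercase vowels
theorem banned_lit : altBanned = ([32, 97, 111, 105, 101, 117] : List Int) := by decide

theorem mem_altBanned (c : Char) :
    ((c.toNat : Nat) : Int) ∈ altBanned ↔ c ∈ ([' ', 'a', 'o', 'i', 'e', 'u'] : List Char) := by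
  rw [banned_lit]
  simp only [List.mem_cons, List.not_mem_nil, or_false]
  constructor
  · rintro (h | h | h | h | h | h)
    · exact Or.inl (toNat_injective c ' ' (by simp only [show (' ').toNat = 32 from by decide]; omega))
    · exact Or.inr (Or.inl (toNat_injective c 'a' (by simp only [show ('a').toNat = 97 from by decide]; omega)))
    · exact Or.inr (Or.inr (Or.inl (toNat_injective c 'o' (by simp only [show ('o').toNat = 111 from by decide]; omega))))
    · exact Or.inr (Or.inr (Or.inr (Or.inl (toNat_injective c 'i' (by simp only [show ('i').toNat = 105 from by decide]; omega)))))
    · exact Or.inr (Or.inr (Or.inr (Or.inr (Or.inl (toNat_injective c 'e' (by simp only [show ('e').toNat = 101 from by decide]; omega))))))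
    · exact Or.inr (Or.inr (Or.inr (Or.inr (Or.inr (toNat_injective c 'u' (by simp only [show ('u').toNat = 117 from by decide]; omega))))))
  · rintro (h | h | h | h | h | h) <;> subst h <;> decide

theorem keepChar_iff (c : Char) :
    keepChar c = true ↔ ¬ c ∈ ([' ', 'a', 'o', 'i', 'e', 'u'] : List Char) := by
  unfold keepChar
  simp only [Bool.and_eq_true, Bool.not_eq_true', decide_eq_false_iff_not, List.mem_cons,
    List.not_mem_nil, or_false]
  tauto

-- emitChars of the accumulated row has exactly the membership of A's filtered column set
theorem mem_emitChars (cs : List Char) (hcs : ∀ c ∈ cs, c.toNat < 128) (x : Char) :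
    x ∈ emitChars (cs.foldl updRow (List.replicate 128 false))
      ↔ (x ∈ cs ∧ keepChar x) := by
  unfold emitChars
  simp only [List.mem_map, List.mem_filter, List.mem_range, Bool.and_eq_true,
    Bool.not_eq_true', decide_eq_false_iff_not]
  constructor
  · rintro ⟨k, ⟨hk, hrow, hb⟩, hx⟩
    rw [getD_foldl_updRow cs _ k (by simp) hcs hk, List.getD_replicate false hk] at hrow
    simp only [Bool.false_or, List.any_eq_true, decide_eq_true_eq] at hrow
    obtain ⟨c, hc, hck⟩ := hrow
    have hxc : x = c := by rw [← hx, ← hck, Char.ofNat_toNat]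
    subst hxc
    refine ⟨hc, ?_⟩
    rw [keepChar_iff]
    intro hmem
    exact hb (hck ▸ (mem_altBanned x).mpr hmem)
  · rintro ⟨hx, hkeep⟩
    have hlt : x.toNat < 128 := hcs x hx
    refine ⟨x.toNat, ⟨hlt, ?_, ?_⟩, Char.ofNat_toNat x⟩
    · rw [getD_foldl_updRow cs _ x.toNat (by simp) hcs hlt, List.getD_replicate false hlt]
      simp only [Bool.false_or, List.any_eq_true]
      exact ⟨x, hx, by simp⟩
    · rw [mem_altBanned x]
      exact (keepChar_iff x).mp hkeep

theorem pairwise_emitChars (row : List Bool) : (emitChars row).Pairwise (· < ·) := by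
  unfold emitChars
  rw [List.pairwise_map]
  refine List.Pairwise.imp_of_mem ?_ ((List.pairwise_lt_range).filter _)
  intro a b ha hb hab
  have ha' : a < 128 := List.mem_range.mp (List.mem_of_mem_filter ha)
  have hb' : b < 128 := List.mem_range.mp (List.mem_of_mem_filter hb)
  apply char_lt_of_toNat_lt
  rw [toNat_ofNat_lt a ha', toNat_ofNat_lt b hb']
  exact hab

theorem nodup_emitChars (row : List Bool) : (emitChars row).Nodup := by
  unfold emitChars
  apply List.Nodup.map_on
  · intro a ha b hb hab
    have ha' : a < 128 := List.mem_range.mp (List.mem_of_mem_filter ha)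
    have hb' : b < 128 := List.mem_range.mp (List.mem_of_mem_filter hb)
    rw [← toNat_ofNat_lt a ha', ← toNat_ofNat_lt b hb', hab]
  · exact (List.nodup_range).filter _

-- ---------- the per-column equality ----------

theorem sorted_eq_emit (cs : List Char) (hcs : ∀ c ∈ cs, c.toNat < 128) :
    PySem.List.sorted (cs.foldl setStep []) (fun x => x) false
      = emitChars (cs.foldl updRow (List.replicate 128 false)) := by
  apply PySem.List.sorted_eq_of_perm_of_pairwise_lt
  · rw [List.perm_ext_iff_of_nodup (nodup_emitChars _) (nodup_foldl_setStep cs [] List.nodup_nil)]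
    intro x
    rw [mem_emitChars cs hcs x, mem_foldl_setStep]
    simp
  · exact pairwise_emitChars _

-- A's padding loop is an append of spaces
theorem aloPad_eq (lines : List String) (lst : List Char) :
    aloPad lines lst
      = lst ++ List.replicate (((lines.length : Int) - (lst.length : Int))).toNat ' ' := by
  unfold aloPad
  split_ifs with h
  · simp [h]
  · rw [PySem.List.foldl_append_singleton_eq_map (f := fun _ => ' '), List.map_const',
      PySem.List.length_pyRange_one]
    norm_num

-- B's outer loop written as a flatMap over the presence rows
theorem alt_outer_foldl (nrows : Nat) (rows : List (List Bool)) (acc : List String) :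
    rows.foldl (fun out row =>
        let oc := altEmit row (out, 0)
        oc.1 ++ List.replicate (((nrows : Int) - oc.2)).toNat " ") acc
      = acc ++ rows.flatMap (fun row =>
          (emitChars row).map pvSing ++
            List.replicate (((nrows : Int) - ((emitChars row).length : Int))).toNat " ") := by
  rw [PySem.List.foldl_congr_mem rows _
    (fun out row =>
      out ++ ((emitChars row).map pvSing ++
        List.replicate (((nrows : Int) - ((emitChars row).length : Int))).toNat " ")) acc
    (fun out row _ => by simp [altEmit_eq])]
  exact PySem.List.foldl_append_eq_flatMap _ rows acc

theorem alo_eq_alt (lines : List String) (hdom : Dom_alo lines) : alo lines = alo_alt lines := by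
  have hcs : ∀ j : Nat, ∀ c ∈ colChars lines j, c.toNat < 128 := by
    intro j c hc
    unfold colChars at hc
    simp only [List.mem_map] at hc
    obtain ⟨s, hs, hc⟩ := hc
    by_cases hin : PySem.Raise.InRange s.toList.length (j : Int)
    · -- in range: the char is a char of a line, Dom bounds it
      have hmem : c ∈ s.toList := hc ▸ PySem.List.pyGetD_mem s.toList ' ' hin
      unfold Dom_alo at hdom
      rw [List.all_eq_true] at hdom
      have := hdom s hs
      unfold pvDomStr at this
      rw [List.all_eq_true] at this
      have := this c hmem
      unfold pvDomChar at this
      simp only [Bool.or_eq_true, Bool.and_eq_true, decide_eq_true_eq, beq_iff_eq] at this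
      omega
    · -- out of range: the default ' ' (code 32)
      have : PySem.List.pyGetD s.toList (j : Int) ' ' = ' ' := by
        refine PySem.List.pyGetD_of_none _ _ _ ?_
        rw [PySem.List.pyGet?_eq_none_iff]
        exact hin
      rw [← hc, this]
      decide
  unfold alo alo_alt
  dsimp only
  rw [PySem.List.foldl_append_eq_flatMap
    (g := fun el_ind =>
      (aloPad lines (PySem.List.sorted (aloInner lines el_ind) (fun x => x) false)).map pvSing)]
  have hrep : List.replicate ((PySem.List.pyGetD lines 0 "").toList.length) (List.replicate 128 false)
      = (List.range ((PySem.List.pyGetD lines 0 "").toList.length)).map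
          (fun _ => (List.replicate 128 false)) := by
    rw [List.map_const', List.length_range]
  rw [hrep, foldl_altStep, alt_outer_foldl, List.flatMap_map,
    PySem.List.pyRange_zero_nat, List.flatMap_map]
  simp only [List.nil_append]
  congr 1
  funext j
  have hrow : lines.foldl (fun row line => updRow row (PySem.List.pyGetD line.toList (j : Int) ' '))
      (List.replicate 128 false) = (colChars lines j).foldl updRow (List.replicate 128 false) := by
    unfold colChars; rw [List.foldl_map]
  rw [innerA, hrow, sorted_eq_emit (colChars lines j) (hcs j), aloPad_eq,
    List.map_append, List.map_replicate]
  rfl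

-- ===== VERDICT (by name: the statement is the Claim_ definition above) =====
theorem alo_spec : Claim_equal_alo := by
  intro lines hdom _
  unfold Spec_alo
  exact alo_eq_alt lines hdom
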